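-- pv_equiv track=rewrite | github.com/KirillhacT/LeetcodeAlgorithms | algoCoding/Coorse_Dynamin_Programming/memorisation_method/count_comstruct_memorisation__7.py | badCanConstruct
-- ===== SOURCE A (Python) =====
-- def badCanConstruct(target, wordBank):
--     if target == "":
--         return 1
--     cur = 0
--     for i in wordBank:
--         cur_len = len(i)
--         if target[:cur_len] == i:
--             res = badCanConstruct(target[cur_len:], wordBank)
--             cur += res
--     return cur
-- ===== SOURCE B (Python) =====
-- def badCanConstruct(target, wordBank):
--     n = len(target)
--     ways = [0] * (n + 1)
--     ways[n] = 1
--     for i in range(n - 1, -1, -1):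
--         ways[i] = sum(ways[i + len(w)] for w in wordBank if target.startswith(w, i))
--     return ways[0]
-- ===== Notes on version B (the rewrite author's own statement) =====
-- stated objective: alternative
-- what changed: Replaced A's unmemoized recursion over target suffixes by a bottom-up DP table ways[i] = number of ways to build target[i:], filled right-to-left in one pass over positions.
import Mathlib
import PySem

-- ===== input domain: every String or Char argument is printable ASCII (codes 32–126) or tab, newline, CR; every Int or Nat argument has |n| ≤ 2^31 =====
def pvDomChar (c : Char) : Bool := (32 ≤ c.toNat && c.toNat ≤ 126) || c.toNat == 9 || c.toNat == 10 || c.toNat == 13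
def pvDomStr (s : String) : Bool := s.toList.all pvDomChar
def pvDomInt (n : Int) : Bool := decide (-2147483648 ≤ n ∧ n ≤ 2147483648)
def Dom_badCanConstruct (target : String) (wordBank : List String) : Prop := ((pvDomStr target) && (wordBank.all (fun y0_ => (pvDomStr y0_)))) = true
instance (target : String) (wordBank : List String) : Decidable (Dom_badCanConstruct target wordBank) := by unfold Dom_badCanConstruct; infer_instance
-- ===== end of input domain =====

-- B replaces A's unmemoized recursion over target suffixes by a bottom-up
-- DP table over positions (ways[i] = ways to build target[i:]).


-- ===== PORT A =====
-- A's recursion on the target suffix; the fuel only makes the recursion total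
-- (inside Pre_ every matched word is non-empty, so fuel = length+1 never runs out).
def goA : Nat → List Char → List (List Char) → Int
  | 0, _, _ => 0
  | fuel+1, t, bank =>
    if t = [] then 1
    else bank.foldl (fun cur w =>
      if t.take w.length = w then cur + goA fuel (t.drop w.length) bank else cur) 0

def badCanConstruct (target : String) (wordBank : List String) : Int :=
  goA (target.toList.length + 1) target.toList (wordBank.map String.toList)

-- ===== PORT B =====
-- one pass of B's loop body: ways[i] = sum(ways[i+len(w)] for w in wordBank if target.startswith(w, i))
def fillB (t : List Char) (bank : List (List Char)) (ways : List Int) (i : Nat) : List Int :=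
  ways.set i (bank.foldl (fun s w =>
    if (t.drop i).take w.length = w then s + ways.getD (i + w.length) 0 else s) 0)

def badCanConstruct_alt (target : String) (wordBank : List String) : Int :=
  let t := target.toList
  let bank := wordBank.map String.toList
  let n := t.length
  let ways := (List.replicate (n+1) (0:Int)).set n 1
  (((List.range n).reverse.foldl (fillB t bank) ways)).getD 0 0

-- ===== PRECONDITION & SPEC =====
-- Pre_ excludes only inputs where A raises: with a non-empty target and "" in wordBank,
-- A recurses forever on the same target and hits Python's recursion limit (RecursionError).
def Pre_badCanConstruct (target : String) (wordBank : List String) : Prop :=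
  target = "" ∨ "" ∉ wordBank
instance (target : String) (wordBank : List String) : Decidable (Pre_badCanConstruct target wordBank) := by unfold Pre_badCanConstruct; infer_instance

def pvWitness_badCanConstruct : String × List String := ("abab", ["a", "b", "ab"])

def Spec_badCanConstruct (target : String) (wordBank : List String) (out : Int) : Prop := out = badCanConstruct_alt target wordBank
instance (target : String) (wordBank : List String) (out : Int) : Decidable (Spec_badCanConstruct target wordBank out) := by unfold Spec_badCanConstruct; infer_instance

-- ===== CLAIM (what is proved, stated in full; the proofs are below) =====
def Claim_equal_badCanConstruct : Prop := ∀ (target : String) (wordBank : List String), Dom_badCanConstruct target wordBank → Pre_badCanConstruct target wordBank → Spec_badCanConstruct target wordBank (badCanConstruct target wordBank)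

-- ===== LEMMAS AND PROOFS =====

-- A's recursion with exactly the fuel it needs
def cnt (t : List Char) (bank : List (List Char)) : Int := goA (t.length + 1) t bank

theorem foldlCongrMem {α β : Type} (l : List α) (f g : β → α → β)
    (h : ∀ b a, a ∈ l → f b a = g b a) : ∀ b, l.foldl f b = l.foldl g b := by
  induction l with
  | nil => intro b; rfl
  | cons x xs ih =>
    intro b
    simp only [List.foldl_cons]
    rw [h b x (by simp)]
    exact ih (fun b a ha => h b a (by simp [ha])) _

theorem goA_fuel_irrel (bank : List (List Char)) (hb : [] ∉ bank) :
    ∀ f1 f2 t, t.length < f1 → t.length < f2 → goA f1 t bank = goA f2 t bank := by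
  intro f1
  induction f1 with
  | zero => intro f2 t h1 _; omega
  | succ f1' ih =>
    intro f2 t h1 h2
    match f2, h2 with
    | f2' + 1, h2 =>
      by_cases ht : t = []
      · simp [goA, ht]
      · simp only [goA, if_neg ht]
        refine foldlCongrMem bank _ _ ?_ 0
        intro b w hw
        by_cases hm : t.take w.length = w
        · have hwne : w ≠ [] := fun h => hb (h ▸ hw)
          have hwl : 1 ≤ w.length := by
            cases w with
            | nil => exact absurd rfl hwne
            | cons _ _ => simp
          have htl : 1 ≤ t.length := by
            cases t with
            | nil => exact absurd rfl ht
            | cons _ _ => simp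
          have hd : (t.drop w.length).length < f1' := by
            simp only [List.length_drop]; omega
          have hd2 : (t.drop w.length).length < f2' := by
            simp only [List.length_drop]; omega
          simp [hm, ih f2' (t.drop w.length) hd hd2]
        · simp [hm]

theorem goA_eq_cnt (bank : List (List Char)) (hb : [] ∉ bank) (f : Nat) (t : List Char)
    (h : t.length < f) : goA f t bank = cnt t bank :=
  goA_fuel_irrel bank hb f (t.length + 1) t h (by omega)

theorem fill_inv (t : List Char) (bank : List (List Char)) (hb : [] ∉ bank) :
    ∀ m, m ≤ t.length → ∀ ways : List Int, ways.length = t.length + 1 →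
    (∀ j, m ≤ j → j ≤ t.length → ways.getD j 0 = cnt (t.drop j) bank) →
    ∀ j, j ≤ t.length →
      ((List.range m).reverse.foldl (fillB t bank) ways).getD j 0 = cnt (t.drop j) bank := by
  intro m
  induction m with
  | zero =>
    intro _ ways _ hinv j hj
    simpa using hinv j (Nat.zero_le j) hj
  | succ m ih =>
    intro hm ways hlen hinv j hj
    rw [List.range_succ, List.reverse_append]
    simp only [List.reverse_singleton, List.singleton_append, List.foldl_cons]
    refine ih (by omega) (fillB t bank ways m) (by simp [fillB, hlen]) ?_ j hj
    intro j' hj1 hj2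
    by_cases hjm : j' = m
    · subst hjm
      have hmlt : j' < ways.length := by omega
      have hset : (fillB t bank ways j').getD j' 0 =
          bank.foldl (fun s w =>
            if (t.drop j').take w.length = w then s + ways.getD (j' + w.length) 0 else s) 0 := by
        simp [fillB, List.getD_eq_getElem?_getD, hmlt]
      rw [hset]
      -- evaluate cnt on the non-empty suffix
      have hdne : t.drop j' ≠ [] := by
        intro h
        have := congrArg List.length h
        simp only [List.length_drop, List.length_nil] at this
        omega
      have hdl : (t.drop j').length = t.length - j' := List.length_drop ..
      have : cnt (t.drop j') bank =
          bank.foldl (fun cur w =>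
            if (t.drop j').take w.length = w
            then cur + goA ((t.drop j').length) ((t.drop j').drop w.length) bank else cur) 0 := by
        simp [cnt, goA]
        exact fun h => absurd h (by omega)
      rw [this]
      refine (foldlCongrMem bank _ _ ?_ 0).symm
      intro b w hw
      by_cases hmch : (t.drop j').take w.length = w
      · have hwne : w ≠ [] := fun h => hb (h ▸ hw)
        have hwl : 1 ≤ w.length := by
          cases w with
          | nil => exact absurd rfl hwne
          | cons _ _ => simp
        have hwle : w.length ≤ (t.drop j').length := by
          have := congrArg List.length hmch
          simp only [List.length_take] at this
          omega
        have hdd : (t.drop j').drop w.length = t.drop (j' + w.length) := by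
          rw [List.drop_drop]
        have hfuel : (t.drop (j' + w.length)).length < (t.drop j').length := by
          simp only [List.length_drop] at *
          omega
        rw [hdd]
        rw [goA_eq_cnt bank hb _ _ hfuel]
        rw [hinv (j' + w.length) (by omega) (by simp [hdl] at hwle; omega)]
      · simp [hmch]
    · -- set at m does not touch index j' ≠ m
      have : (fillB t bank ways m).getD j' 0 = ways.getD j' 0 := by
        simp [fillB, List.getD_eq_getElem?_getD, List.getElem?_set_ne (Ne.symm hjm)]
      rw [this]
      exact hinv j' (by omega) hj2

theorem toList_ne_nil_of_mem (w : String) (hw : w ≠ "") : w.toList ≠ [] := by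
  intro h
  apply hw
  have := congrArg String.ofList h
  simpa using this

-- ===== VERDICT (by name: the statement is the Claim_ definition above) =====
theorem badCanConstruct_spec : Claim_equal_badCanConstruct := by
  intro target wordBank _ hpre
  unfold Spec_badCanConstruct
  rcases hpre with h | h
  · subst h
    simp [badCanConstruct, badCanConstruct_alt, goA]
  · -- "" ∉ wordBank, so [] ∉ mapped bank
    have hb : [] ∉ wordBank.map String.toList := by
      intro hmem
      rcases List.mem_map.mp hmem with ⟨w, hw, hwe⟩
      by_cases hwq : w = ""
      · exact h (hwq ▸ hw)
      · exact toList_ne_nil_of_mem w hwq hwe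
    set t := target.toList with ht
    set bank := wordBank.map String.toList with hbk
    have hA : badCanConstruct target wordBank = cnt t bank := rfl
    rw [hA]
    unfold badCanConstruct_alt
    simp only [← ht, ← hbk]
    have hinit : ∀ j, t.length ≤ j → j ≤ t.length →
        ((List.replicate (t.length + 1) (0:Int)).set t.length 1).getD j 0 = cnt (t.drop j) bank := by
      intro j h1 h2
      have hj : j = t.length := by omega
      subst hj
      have : ((List.replicate (t.length + 1) (0:Int)).set t.length 1).getD t.length 0 = 1 := by
        simp [List.getD_eq_getElem?_getD]
      rw [this, List.drop_length]
      simp [cnt, goA]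
    have := fill_inv t bank hb t.length (le_refl _)
      ((List.replicate (t.length + 1) (0:Int)).set t.length 1)
      (by simp) hinit 0 (Nat.zero_le _)
    rw [this]
    simp [cnt]
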